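-- pv_equiv track=rewrite | github.com/bleonheart/Lilia | documentation/docs/tools/remove_lua_comments.py | _match_long_bracket_opener
-- ===== SOURCE A (Python) =====
-- def _match_long_bracket_opener(text: str, start_index: int):
--     i = start_index
--     if i >= len(text) or text[i] != "[":
--         return False, 0, start_index
--     i += 1
--     num_equals = 0
--     while i < len(text) and text[i] == "=":
--         num_equals += 1
--         i += 1
--     if i < len(text) and text[i] == "[":
--         return True, num_equals, i + 1
--     return False, 0, start_index
-- ===== SOURCE B (Python) =====
-- def _match_long_bracket_opener(text: str, start_index: int):
--     tail = text[start_index:]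
--     if not tail.startswith("["):
--         return False, 0, start_index
--     rest = tail[1:].lstrip("=")
--     if not rest.startswith("["):
--         return False, 0, start_index
--     num_equals = len(tail) - 1 - len(rest)
--     return True, num_equals, len(text) - len(tail) + num_equals + 2
-- ===== Notes on version B (the rewrite author's own statement) =====
-- stated objective: idiomatic
-- what changed: Replaced A's explicit index-by-index while-loop over the string with slicing plus startswith and lstrip('='): B takes the suffix text[start_index:], strips the '[' and the run of '=' with library calls, and recovers the count and the next index from the lengths.
-- outside the precondition, e.g. on _match_long_bracket_opener('=[', -1): A returns (True, 1, 2), B returns (False, 0, -1)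
import Mathlib
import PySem

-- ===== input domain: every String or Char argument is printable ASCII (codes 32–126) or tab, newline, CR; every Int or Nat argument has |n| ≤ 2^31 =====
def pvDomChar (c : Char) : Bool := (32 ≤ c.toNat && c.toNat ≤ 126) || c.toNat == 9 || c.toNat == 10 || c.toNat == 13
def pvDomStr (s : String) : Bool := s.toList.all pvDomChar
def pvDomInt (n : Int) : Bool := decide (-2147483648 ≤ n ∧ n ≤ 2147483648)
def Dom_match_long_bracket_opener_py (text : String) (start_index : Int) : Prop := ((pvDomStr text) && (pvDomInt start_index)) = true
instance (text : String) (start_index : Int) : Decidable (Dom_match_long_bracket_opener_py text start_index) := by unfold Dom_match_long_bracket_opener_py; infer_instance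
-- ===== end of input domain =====

-- B replaces A's index-by-index while-loop with slicing + startswith + lstrip("="); idiomatic, same cost.

-- ===== PORT A =====
-- the 'while i < len(text) and text[i] == "=":' loop; state (num_equals, i)
def mlbLoopA (cs : List Char) (i : Int) (num : Int) : Int × Int :=
  if h : i < (cs.length : Int) ∧ PySem.List.pyGet? cs i = some '=' then
    mlbLoopA cs (i + 1) (num + 1)
  else (num, i)
termination_by ((cs.length : Int) - i).toNat
decreasing_by omega

def match_long_bracket_opener_py (text : String) (start_index : Int) : Bool × Int × Int :=
  let cs := text.toList
  let i := start_index
  if i ≥ (cs.length : Int) ∨ ¬ (PySem.List.pyGet? cs i = some '[') then (false, 0, start_index)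
  else
    let p := mlbLoopA cs (i + 1) 0
    if p.2 < (cs.length : Int) ∧ PySem.List.pyGet? cs p.2 = some '[' then (true, p.1, p.2 + 1)
    else (false, 0, start_index)

-- ===== PORT B =====
def match_long_bracket_opener_py_alt (text : String) (start_index : Int) : Bool × Int × Int :=
  let cs := text.toList
  let tail := PySem.List.slice cs (some start_index) none            -- text[start_index:]
  if ¬ (PySem.Chars.startswith tail ['['] = true) then (false, 0, start_index)
  else
    -- tail[1:].lstrip("=") : hand port of lstrip with the one-char set "=", exact: drop leading '='
    let rest := (PySem.List.slice tail (some 1) none).dropWhile (· == '=')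
    if ¬ (PySem.Chars.startswith rest ['['] = true) then (false, 0, start_index)
    else
      let num_equals : Int := (tail.length : Int) - 1 - (rest.length : Int)
      (true, num_equals, (cs.length : Int) - (tail.length : Int) + num_equals + 2)

-- ===== PRECONDITION & SPEC =====
-- Pre_ excludes negative start_index: there Python's negative-index wraparound makes A scan from the
-- end of the string and then jump back to its front (and raise IndexError below -len(text)) — an
-- accidental corner no caller exercises, which B's suffix-based scan cannot meaningfully match.
def Pre_match_long_bracket_opener_py (text : String) (start_index : Int) : Prop := 0 ≤ start_index
instance (text : String) (start_index : Int) : Decidable (Pre_match_long_bracket_opener_py text start_index) := by unfold Pre_match_long_bracket_opener_py; infer_instance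

def pvWitness_match_long_bracket_opener_py : String × Int := ("[==[x", 0)

def Spec_match_long_bracket_opener_py (text : String) (start_index : Int) (out : Bool × Int × Int) : Prop := out = match_long_bracket_opener_py_alt text start_index
instance (text : String) (start_index : Int) (out : Bool × Int × Int) : Decidable (Spec_match_long_bracket_opener_py text start_index out) := by unfold Spec_match_long_bracket_opener_py; infer_instance

-- ===== CLAIM (what is proved, stated in full; the proofs are below) =====
def Claim_equal_match_long_bracket_opener_py : Prop := ∀ (text : String) (start_index : Int), Dom_match_long_bracket_opener_py text start_index → Pre_match_long_bracket_opener_py text start_index → Spec_match_long_bracket_opener_py text start_index (match_long_bracket_opener_py text start_index)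

-- ===== LEMMAS AND PROOFS =====

-- a list starts with the single character c iff its head is c
theorem startswith_singleton (l : List Char) (c : Char) :
    PySem.Chars.startswith l [c] = true ↔ l.head? = some c := by
  rw [PySem.Chars.startswith_iff]
  cases l with
  | nil => simp
  | cons a t => simp [List.cons_prefix_cons, eq_comm]

-- A's while-loop counts the run of '=' starting at j (for 0 ≤ j)
theorem mlbLoopA_eq (k : Nat) (cs : List Char) (j num : Int) (hj : 0 ≤ j)
    (hk : (cs.length : Int) ≤ j + k) :
    mlbLoopA cs j num =
      (num + (((cs.drop j.toNat).takeWhile (· == '=')).length : Int),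
       j + (((cs.drop j.toNat).takeWhile (· == '=')).length : Int)) := by
  induction k generalizing j num with
  | zero =>
    rw [mlbLoopA]
    have hdrop : cs.drop j.toNat = [] := List.drop_eq_nil_of_le (by omega)
    simp [hdrop]
    omega
  | succ k ih =>
    by_cases hc : j < (cs.length : Int) ∧ PySem.List.pyGet? cs j = some '='
    · have hjl : j.toNat < cs.length := by omega
      have h2 := hc.2
      rw [PySem.List.pyGet?_of_nonneg (xs := cs) (i := j) hj] at h2
      have hget : cs[j.toNat] = '=' := by
        simpa [List.getElem?_eq_getElem hjl] using h2
      have hdrop : cs.drop j.toNat = '=' :: cs.drop (j.toNat + 1) := by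
        rw [List.drop_eq_getElem_cons hjl, hget]
      have hnat : (j + 1).toNat = j.toNat + 1 := by omega
      rw [mlbLoopA, dif_pos hc, ih (j + 1) (num + 1) (by omega) (by omega)]
      rw [hnat, hdrop]
      simp [List.takeWhile_cons, Prod.ext_iff]
      omega
    · rw [mlbLoopA, dif_neg hc]
      have hrun : (cs.drop j.toNat).takeWhile (· == '=') = [] := by
        by_cases hl : j < (cs.length : Int)
        · have hjl : j.toNat < cs.length := by omega
          have hne : ¬ cs[j.toNat] = '=' := by
            intro h
            apply hc
            refine ⟨hl, ?_⟩
            rw [PySem.List.pyGet?_of_nonneg (xs := cs) (i := j) hj]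
            simp [List.getElem?_eq_getElem hjl, h]
          rw [List.drop_eq_getElem_cons hjl]
          simp [List.takeWhile_cons, hne]
        · rw [List.drop_eq_nil_of_le (by omega)]
          rfl
      simp [hrun]

theorem match_long_bracket_opener_main :
    ∀ (text : String) (start_index : Int), 0 ≤ start_index →
      match_long_bracket_opener_py text start_index = match_long_bracket_opener_py_alt text start_index := by
  intro text start_index hpre
  lift start_index to ℕ using hpre with s
  simp only [match_long_bracket_opener_py, match_long_bracket_opener_py_alt]
  set cs := text.toList with hcs
  rw [PySem.List.slice_from_natCast, PySem.List.pyGet?_natCast, PySem.List.slice_from_one]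
  by_cases h1 : cs[s]? = some '['
  · have hs : s < cs.length := by
      by_contra h
      rw [List.getElem?_eq_none (by omega)] at h1
      simp at h1
    set t := cs.drop (s + 1) with ht
    have hdrop : cs.drop s = '[' :: t := by
      rw [List.drop_eq_getElem_cons hs, ht]
      have : cs[s] = '[' := by simpa [List.getElem?_eq_getElem hs] using h1
      rw [this]
    set e := (t.takeWhile (· == '=')).length with he
    have htw : t.takeWhile (· == '=') ++ t.dropWhile (· == '=') = t :=
      List.takeWhile_append_dropWhile
    have hsum : e + (t.dropWhile (· == '=')).length = t.length := by
      conv_rhs => rw [← htw]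
      rw [List.length_append, he]
    have hlt' : t.length + (s + 1) = cs.length := by
      rw [ht, List.length_drop]
      omega
    have hrest : t.dropWhile (· == '=') = t.drop e := by
      conv_rhs => rw [← htw, he]
      exact List.drop_left.symm
    have hloop : mlbLoopA cs ((s : Int) + 1) 0 = ((e : Int), (s : Int) + 1 + (e : Int)) := by
      have h := mlbLoopA_eq cs.length cs ((s : Int) + 1) 0 (by omega) (by omega)
      have hnat : ((s : Int) + 1).toNat = s + 1 := by omega
      rw [hnat, ← ht, ← he] at h
      simpa using h
    have hhead : (t.dropWhile (· == '=')).head? = cs[s + 1 + e]? := by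
      rw [hrest, List.head?_eq_getElem?, List.getElem?_drop, ht, List.getElem?_drop]
      congr 1
    have hcast : ((s + 1 + e : Nat) : Int) = (s : Int) + 1 + (e : Int) := by
      push_cast
      ring
    have hgete : PySem.List.pyGet? cs ((s : Int) + 1 + (e : Int)) = cs[s + 1 + e]? := by
      rw [← hcast, PySem.List.pyGet?_natCast]
    rw [if_neg (by
      simp only [not_or, not_not, not_le]
      exact ⟨by exact_mod_cast hs, h1⟩)]
    rw [hloop]
    dsimp only
    rw [hgete]
    by_cases h2 : cs[s + 1 + e]? = some '['
    · have hs2 : s + 1 + e < cs.length := by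
        by_contra h
        rw [List.getElem?_eq_none (by omega)] at h2
        simp at h2
      rw [if_pos ⟨by exact_mod_cast hs2, h2⟩]
      rw [if_neg (by
        rw [not_not, startswith_singleton, hdrop]
        simp)]
      rw [hdrop, List.tail_cons]
      rw [if_neg (by
        rw [not_not, startswith_singleton, hhead]
        exact h2)]
      simp only [Prod.mk.injEq, List.length_cons, true_and]
      omega
    · rw [if_neg (by rintro ⟨h3, h4⟩; exact h2 h4)]
      rw [if_neg (by
        rw [not_not, startswith_singleton, hdrop]
        simp)]
      rw [hdrop, List.tail_cons]
      rw [if_pos (by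
        rw [startswith_singleton, hhead]
        exact h2)]
  · rw [if_pos (Or.inr h1)]
    rw [if_pos (by
      rw [startswith_singleton, List.head?_eq_getElem?, List.getElem?_drop]
      simpa using h1)]

-- ===== VERDICT (by name: the statement is the Claim_ definition above) =====
theorem match_long_bracket_opener_py_spec : Claim_equal_match_long_bracket_opener_py := by
  intro text start_index _ hpre
  unfold Spec_match_long_bracket_opener_py
  exact match_long_bracket_opener_main text start_index hpre
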